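-- pv_equiv track=rewrite | github.com/raymondcheung8/rlcard | rlcard/agents/equity_agent.py | get_two_pair_outs
-- ===== SOURCE A (Python) =====
-- def get_two_pair_outs(cards):
--     '''
--     Args:
--         cards (list): A list of strings that represent cards
--
--     Returns:
--         outs (int): The number of outs for getting a two pair
--     '''
--     pair_count = 0
--     ranks = set()
--     for card in cards:
--         # Check if new card creates a pair
--         if card[-1] in ranks:
--             if pair_count == 0:
--                 pair_count += 1
--                 ranks.remove(card[-1])
--             else:
--                 # Return -1 if a two pair already exists
--                 return -1
--         else:
--             ranks.add(card[-1])
--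
--     # There are 4 suits in a deck so there are 3 remaining suits to choose from
--     return 3 * len(ranks) if pair_count == 1 else 0
-- ===== SOURCE B (Python) =====
-- def get_two_pair_outs(cards):
--     # Frequency table of ranks (last char of each card), then aggregate.
--     counts = {}
--     for card in cards:
--         r = card[-1]
--         counts[r] = counts.get(r, 0) + 1
--     pairs = sum(c // 2 for c in counts.values())
--     if pairs == 0:
--         return 0
--     if pairs >= 2:
--         return -1
--     return 3 * sum(1 for c in counts.values() if c % 2 == 1)
-- ===== Notes on version B (the rewrite author's own statement) =====
-- stated objective: alternative
-- what changed: Replaces A's streaming set-toggle with early return by building a rank frequency table once and deriving the answer from aggregate counts: total pair events P = sum(c//2), returning 0 if P==0, -1 if P>=2, else 3 * (number of ranks with odd count).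
-- outside the precondition, e.g. on get_two_pair_outs(['1a', '2a', '3b', '4b', '']): A returns -1, B raises IndexError
import Mathlib
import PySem

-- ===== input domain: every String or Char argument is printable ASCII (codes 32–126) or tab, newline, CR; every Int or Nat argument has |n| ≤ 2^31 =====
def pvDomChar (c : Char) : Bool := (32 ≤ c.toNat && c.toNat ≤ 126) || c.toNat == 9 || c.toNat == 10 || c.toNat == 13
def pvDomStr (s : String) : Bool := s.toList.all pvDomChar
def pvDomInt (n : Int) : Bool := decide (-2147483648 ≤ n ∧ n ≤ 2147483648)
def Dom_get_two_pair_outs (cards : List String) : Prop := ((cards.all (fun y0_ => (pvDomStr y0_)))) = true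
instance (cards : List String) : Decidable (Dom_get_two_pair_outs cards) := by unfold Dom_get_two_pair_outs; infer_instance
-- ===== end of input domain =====

-- B replaces A's streaming set-toggle/early-return with a build-a-frequency-table-then-aggregate decomposition (alternative, same cost).

-- ===== PORT A =====
-- A's loop: state = (pair_count, ranks set); card[-1] is pyGet? (none = IndexError on "", junk 0, excluded by Pre_).
def pvALoop : List String → Nat → PySem.Set Char → Int
  | [], pair_count, ranks => if pair_count = 1 then 3 * PySem.Set.len ranks else 0
  | card :: rest, pair_count, ranks =>
    match PySem.Str.pyGet? card (-1) with
    | none => 0   -- IndexError: outside Pre_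
    | some r =>
      if PySem.Set.contains ranks r then
        if pair_count = 0 then
          match PySem.Set.remove? ranks r with
          | none => 0       -- KeyError: unreachable (r is a member here)
          | some ranks' => pvALoop rest 1 ranks'
        else -1
      else pvALoop rest pair_count (PySem.Set.add ranks r)

def get_two_pair_outs (cards : List String) : Int :=
  pvALoop cards 0 PySem.Set.empty

-- ===== PORT B =====
-- B's counter loop: builds the rank frequency dict; none = IndexError on "" (excluded by Pre_).
def pvBCounts : List String → PySem.Dict Char Int → Option (PySem.Dict Char Int)
  | [], d => some d
  | card :: rest, d =>
    match PySem.Str.pyGet? card (-1) with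
    | none => none
    | some r => pvBCounts rest (d.modify r 0 (· + 1))

def get_two_pair_outs_alt (cards : List String) : Int :=
  match pvBCounts cards PySem.Dict.empty with
  | none => 0   -- IndexError: outside Pre_
  | some counts =>
    let pairs : Int := ((PySem.Dict.values counts).map (fun c => PySem.Int.floordiv c 2)).sum
    if pairs = 0 then 0
    else if 2 ≤ pairs then -1
    else 3 * (((PySem.Dict.values counts).filter (fun c => PySem.Int.mod c 2 == 1)).length : Int)

-- ===== PRECONDITION & SPEC =====
-- Pre_ excludes lists containing an empty card string: card[-1] raises IndexError in both programs
-- (in A possibly only after an earlier early return of -1, where B raises; see claim cites).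
def Pre_get_two_pair_outs (cards : List String) : Prop := ∀ s ∈ cards, s ≠ ""
instance (cards : List String) : Decidable (Pre_get_two_pair_outs cards) := by unfold Pre_get_two_pair_outs; infer_instance

def pvWitness_get_two_pair_outs : List String := ["SA", "HA", "D2"]

def Spec_get_two_pair_outs (cards : List String) (out : Int) : Prop := out = get_two_pair_outs_alt cards
instance (cards : List String) (out : Int) : Decidable (Spec_get_two_pair_outs cards out) := by unfold Spec_get_two_pair_outs; infer_instance

-- ===== CLAIM (what is proved, stated in full; the proofs are below) =====
def Claim_equal_get_two_pair_outs : Prop := ∀ (cards : List String), Dom_get_two_pair_outs cards → Pre_get_two_pair_outs cards → Spec_get_two_pair_outs cards (get_two_pair_outs cards)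

-- ===== LEMMAS AND PROOFS =====

-- the last character of a (nonempty) card, as both ports read it
def pvLast (s : String) : Char := s.toList.getLastD 'x'

-- pair events per rank (sum of count // 2) and number of odd-count ranks, over the rank multiset
def pvPairs (m : List Char) : Nat := ∑ k ∈ m.toFinset, m.count k / 2
def pvOddSum (m : List Char) : Nat := ∑ k ∈ m.toFinset, m.count k % 2

-- the common value of both programs, as a function of the rank multiset and A's pair_count state
def pvSpec (m : List Char) (pc : Nat) : Int :=
  if pc + pvPairs m = 0 then 0
  else if 2 ≤ pc + pvPairs m then -1
  else 3 * (pvOddSum m : Int)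

lemma pv_pyGet_last (l : List Char) (h : l ≠ []) :
    PySem.List.pyGet? l (-1) = some (l.getLastD 'x') := by
  have hl : 0 < l.length := List.length_pos_iff.mpr h
  simp only [PySem.List.pyGet?, PySem.List.pyIdx?]
  rw [if_neg (by omega), if_pos (by omega)]
  simp only [Option.bind]
  rw [List.getElem?_eq_getElem (by omega)]
  rw [List.getLastD_eq_getLast?, List.getLast?_eq_getElem?]
  rw [List.getElem?_eq_getElem (by omega)]
  simp

lemma pv_str_last (s : String) (h : s ≠ "") :
    PySem.Str.pyGet? s (-1) = some (pvLast s) := by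
  have : s.toList ≠ [] := by
    intro hc
    exact h (by rwa [← String.toList_eq_nil_iff])
  simpa [PySem.Str.pyGet?, PySem.Chars.pyGet?, pvLast] using pv_pyGet_last s.toList this

-- if l1's counts are l2's with two extra copies of r, pair events go up by one and parities are unchanged
lemma pv_shift {l1 l2 : List Char} {r : Char}
    (h : ∀ k, l1.count k = l2.count k + (if k = r then 2 else 0)) :
    pvPairs l1 = pvPairs l2 + 1 ∧ pvOddSum l1 = pvOddSum l2 := by
  have hmem : ∀ k, k ∈ l1 ↔ k = r ∨ k ∈ l2 := by
    intro k
    by_cases hk : k = r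
    · have hk2 := h k
      rw [if_pos hk] at hk2
      have hp : 0 < l1.count k := by omega
      simp only [hk] at hp
      simp only [hk, true_or, iff_true]
      exact List.count_pos_iff.mp hp
    · simp only [hk, false_or]
      have hck := h k
      rw [if_neg hk] at hck
      rw [← List.count_pos_iff, ← List.count_pos_iff (l := l2)]
      omega
  have hT : l1.toFinset = insert r l2.toFinset := by
    ext k
    simp [hmem k]
  -- common computation for a function g applied to counts
  have key : ∀ (g : Nat → Nat),
      (∑ k ∈ l1.toFinset, g (l1.count k)) =
        g (l2.count r + 2) + ∑ k ∈ l2.toFinset.erase r, g (l2.count k) := by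
    intro g
    rw [hT]
    have hr : r ∈ insert r l2.toFinset := Finset.mem_insert_self _ _
    rw [← Finset.add_sum_erase _ _ hr, Finset.erase_insert_eq_erase]
    have h1 : l1.count r = l2.count r + 2 := by have := h r; simpa using this
    rw [h1]
    congr 1
    apply Finset.sum_congr rfl
    intro k hk
    have hkr : k ≠ r := (Finset.mem_erase.mp hk).1
    have hck := h k
    rw [if_neg hkr] at hck
    have : l1.count k = l2.count k := by omega
    rw [this]
  have key2 : ∀ (g : Nat → Nat), g 0 = 0 →
      (∑ k ∈ l2.toFinset, g (l2.count k)) =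
        g (l2.count r) + ∑ k ∈ l2.toFinset.erase r, g (l2.count k) := by
    intro g hg0
    by_cases hr : r ∈ l2.toFinset
    · rw [← Finset.add_sum_erase _ _ hr]
    · rw [Finset.erase_eq_of_notMem hr]
      have : l2.count r = 0 := by
        rw [List.count_eq_zero]
        intro hc; exact hr (List.mem_toFinset.mpr hc)
      rw [this, hg0, Nat.zero_add]
  constructor
  · have e1 := key (fun c => c / 2)
    have e2 := key2 (fun c => c / 2) (by norm_num)
    unfold pvPairs
    simp only at e1 e2
    rw [e1, e2]
    omega
  · have e1 := key (fun c => c % 2)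
    have e2 := key2 (fun c => c % 2) (by norm_num)
    unfold pvOddSum
    simp only at e1 e2
    rw [e1, e2]
    omega

lemma pv_pairs_pos {l : List Char} {r : Char} (h : 2 ≤ l.count r) : 1 ≤ pvPairs l := by
  have hmem : r ∈ l.toFinset := List.mem_toFinset.mpr (List.count_pos_iff.mp (by omega))
  have : l.count r / 2 ≤ ∑ k ∈ l.toFinset, l.count k / 2 :=
    Finset.single_le_sum (f := fun k => l.count k / 2) (fun i _ => Nat.zero_le _) hmem
  unfold pvPairs
  omega

lemma pv_nodup_base {S : List Char} (h : S.Nodup) : pvPairs S = 0 ∧ pvOddSum S = S.length := by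
  have hc : ∀ k ∈ S.toFinset, S.count k = 1 := fun k hk =>
    List.count_eq_one_of_mem h (List.mem_toFinset.mp hk)
  constructor
  · unfold pvPairs
    apply Finset.sum_eq_zero
    intro k hk
    simp [hc k hk]
  · unfold pvOddSum
    calc (∑ k ∈ S.toFinset, S.count k % 2) = ∑ k ∈ S.toFinset, 1 := by
          apply Finset.sum_congr rfl
          intro k hk; rw [hc k hk]
      _ = S.toFinset.card := by simp
      _ = S.length := List.toFinset_card_of_nodup h

-- counts of S ++ r :: rest vs (S minus r) ++ rest, for a member r of the nodup set S
lemma pv_count_discard {S rest : List Char} {r : Char} (hS : S.Nodup) (hr : r ∈ S) :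
    ∀ k, (S ++ r :: rest).count k = ((PySem.Set.discard S r) ++ rest).count k + (if k = r then 2 else 0) := by
  intro k
  have hfilter : (S.filter (fun y => !y == r)).count k = if k = r then 0 else S.count k := by
    by_cases hk : k = r
    · rw [if_pos hk, hk, List.count_eq_zero]
      intro hc; have := List.of_mem_filter hc; simp at this
    · rw [if_neg hk]; exact List.count_filter (by simp [hk])
  have hS1 : S.count r = 1 := List.count_eq_one_of_mem hS hr
  simp only [List.count_append, List.count_cons, PySem.Set.discard, hfilter]
  by_cases hk : k = r
  · rw [hk]; simp [hS1]; omega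
  · simp [hk, Ne.symm hk]

-- main loop invariant for A: the loop with state (pc, S) computes pvSpec of S's elements plus the remaining ranks
lemma pv_aLoop_eq : ∀ (cards : List String) (pc : Nat) (S : PySem.Set Char),
    (∀ s ∈ cards, s ≠ "") → S.Nodup → pc ≤ 1 →
    pvALoop cards pc S = pvSpec (S ++ cards.map pvLast) pc := by
  intro cards
  induction cards with
  | nil =>
    intro pc S _ hS hpc
    obtain ⟨h1, h2⟩ := pv_nodup_base hS
    simp only [pvALoop, List.map_nil, List.append_nil, pvSpec, h1, h2]
    interval_cases pc
    · simp
    · simp [PySem.Set.len]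
  | cons card rest ih =>
    intro pc S hpre hS hpc
    have hcard : card ≠ "" := hpre card (List.mem_cons_self)
    have hrest : ∀ s ∈ rest, s ≠ "" := fun s hs => hpre s (List.mem_cons_of_mem _ hs)
    simp only [pvALoop, pv_str_last card hcard, List.map_cons]
    set r := pvLast card with hr
    by_cases hmem : r ∈ S
    · rw [if_pos ((PySem.Set.contains_iff S r).mpr hmem)]
      by_cases hpc0 : pc = 0
      · subst hpc0
        rw [if_pos rfl, PySem.Set.remove?_of_mem hmem]
        show pvALoop rest 1 (PySem.Set.discard S r) = _
        rw [ih 1 (PySem.Set.discard S r) hrest (PySem.Set.nodup_discard S r hS) (by omega)]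
        obtain ⟨hp, ho⟩ := pv_shift (l1 := S ++ r :: rest.map pvLast)
          (l2 := PySem.Set.discard S r ++ rest.map pvLast) (pv_count_discard hS hmem)
        simp only [pvSpec, hp, ho]
        have : (0 : Nat) + (pvPairs (PySem.Set.discard S r ++ rest.map pvLast) + 1)
             = 1 + pvPairs (PySem.Set.discard S r ++ rest.map pvLast) := by omega
        rw [this]
      · have hpc1 : pc = 1 := by omega
        subst hpc1
        rw [if_neg (by omega)]
        have hcnt : 2 ≤ (S ++ r :: rest.map pvLast).count r := by
          have h1 : 1 ≤ S.count r := List.count_pos_iff.mpr hmem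
          simp only [List.count_append, List.count_cons]
          simp
          omega
        have h1 := pv_pairs_pos hcnt
        simp only [pvSpec]
        rw [if_neg (by omega), if_pos (by omega)]
    · rw [if_neg (fun hc => hmem ((PySem.Set.contains_iff S r).mp hc))]
      rw [ih pc (PySem.Set.add S r) hrest (PySem.Set.nodup_add S r hS) hpc]
      rw [PySem.Set.add_of_not_mem hmem]
      congr 1
      simp

-- B's counter loop succeeds on nonempty cards and computes Counter(map pvLast cards)
lemma pv_bCounts_eq : ∀ (cards : List String) (d : PySem.Dict Char Int),
    (∀ s ∈ cards, s ≠ "") →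
    pvBCounts cards d = some ((cards.map pvLast).foldl (fun d x => d.modify x 0 (· + 1)) d) := by
  intro cards
  induction cards with
  | nil => intro d _; simp [pvBCounts]
  | cons card rest ih =>
    intro d hpre
    have hcard : card ≠ "" := hpre card (List.mem_cons_self)
    simp only [pvBCounts, pv_str_last card hcard, List.map_cons, List.foldl_cons]
    exact ih _ (fun s hs => hpre s (List.mem_cons_of_mem _ hs))

lemma pv_cast_floordiv (c : Nat) : PySem.Int.floordiv (c : Int) 2 = ((c / 2 : Nat) : Int) := by
  exact_mod_cast PySem.Int.floordiv_natCast c 2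

lemma pv_cast_mod (c : Nat) : PySem.Int.mod (c : Int) 2 = ((c % 2 : Nat) : Int) := by
  exact_mod_cast PySem.Int.mod_natCast c 2

-- sums over the ordered-dedup list equal the Finset sums behind pvPairs/pvOddSum
lemma pv_sum_dedup (m : List Char) (f : Char → Nat) :
    ((PySem.Set.ofList m).map f).sum = ∑ k ∈ m.toFinset, f k := by
  have hnd : (PySem.Set.ofList m).Nodup := PySem.Set.nodup_ofList m
  have hT : (PySem.Set.ofList m).toFinset = m.toFinset := by
    ext k
    simp [PySem.Set.mem_ofList]
  rw [← hT, List.sum_toFinset f hnd]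

-- B's value equals pvSpec of the rank multiset (with pair_count 0)
lemma pv_alt_eq (cards : List String) (hpre : ∀ s ∈ cards, s ≠ "") :
    get_two_pair_outs_alt cards = pvSpec (cards.map pvLast) 0 := by
  set m := cards.map pvLast with hm
  unfold get_two_pair_outs_alt
  rw [pv_bCounts_eq cards PySem.Dict.empty hpre, ← hm, ← PySem.Dict.counter_eq_foldl]
  have hvals : (PySem.Dict.counter m).values = (PySem.Set.ofList m).map (fun k => (m.count k : Int)) := by
    simp only [PySem.Dict.values, PySem.Dict.items_counter, List.map_map]
    rfl
  have hpairs : ((PySem.Dict.counter m).values.map (fun c => PySem.Int.floordiv c 2)).sum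
      = (pvPairs m : Int) := by
    rw [hvals, List.map_map]
    have : ((fun c => PySem.Int.floordiv c 2) ∘ fun k => ((m.count k : Nat) : Int))
         = fun k => ((m.count k / 2 : Nat) : Int) := by
      funext k
      exact pv_cast_floordiv (m.count k)
    rw [this]
    unfold pvPairs
    rw [← pv_sum_dedup m (fun k => m.count k / 2)]
    rw [Nat.cast_list_sum, List.map_map]
    rfl
  have hodd : (((PySem.Dict.counter m).values.filter (fun c => PySem.Int.mod c 2 == 1)).length : Int)
      = (pvOddSum m : Int) := by
    rw [hvals, List.filter_map, List.length_map]
    rw [← List.countP_eq_length_filter]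
    rw [← PySem.List.sum_map_ite_one_zero ((fun c => PySem.Int.mod c 2 == 1) ∘ fun k => ((m.count k : Nat) : Int)) (PySem.Set.ofList m)]
    have heq : ((PySem.Set.ofList m).map (fun x => if ((fun c => PySem.Int.mod c 2 == 1) ∘ fun k => ((m.count k : Nat) : Int)) x = true then (1:Int) else 0))
        = ((PySem.Set.ofList m).map (fun k => ((m.count k % 2 : Nat) : Int))) := by
      apply List.map_congr_left
      intro k _
      simp only [Function.comp, pv_cast_mod]
      by_cases h : m.count k % 2 = 1
      · simp [h]
      · have h0 : m.count k % 2 = 0 := by omega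
        simp [h0]
    rw [heq]
    unfold pvOddSum
    rw [← pv_sum_dedup m (fun k => m.count k % 2)]
    rw [Nat.cast_list_sum, List.map_map]
    rfl
  show (if ((PySem.Dict.counter m).values.map (fun c => PySem.Int.floordiv c 2)).sum = 0 then (0:Int)
    else if 2 ≤ ((PySem.Dict.counter m).values.map (fun c => PySem.Int.floordiv c 2)).sum then -1
    else 3 * ((((PySem.Dict.counter m).values.filter (fun c => PySem.Int.mod c 2 == 1)).length : Nat) : Int)) = pvSpec m 0
  rw [hpairs]
  unfold pvSpec
  simp only [Nat.zero_add]
  by_cases h0 : pvPairs m = 0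
  · rw [if_pos (by exact_mod_cast h0), if_pos h0]
  · rw [if_neg (by exact_mod_cast h0), if_neg h0]
    by_cases h2 : 2 ≤ pvPairs m
    · rw [if_pos (by exact_mod_cast h2), if_pos h2]
    · rw [if_neg (by exact_mod_cast h2), if_neg h2, hodd]

-- ===== VERDICT (by name: the statement is the Claim_ definition above) =====
theorem get_two_pair_outs_spec : Claim_equal_get_two_pair_outs := by
  intro cards _ hpre
  unfold Spec_get_two_pair_outs get_two_pair_outs
  rw [pv_aLoop_eq cards 0 PySem.Set.empty hpre List.nodup_nil (by omega)]
  rw [pv_alt_eq cards hpre]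
  rfl
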